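-- pv_equiv track=rewrite | github.com/pokerdio/generic | aoc/2024/day25.py | toHeights
-- ===== SOURCE A (Python) =====
-- def toHeights(sch):
--     ret = [-1] * 5
--     if sch[0] == ".....":
--         sch = list(reversed(sch))
--
--     for i in range(1, len(sch)):
--         for j, c in enumerate(sch[i]):
--             if c == '.' and ret[j] == -1:
--                 ret[j] = i-1
--     return ret
-- ===== SOURCE B (Python) =====
-- def toHeights(sch):
--     # Column-major: transpose into 5 columns, height = first '.' position (or -1).
--     if sch[0] == ".....":
--         sch = sch[::-1]
--     rows = sch[1:]
--     ret = []
--     for j in range(5):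
--         col = [r[j] if j < len(r) else '#' for r in rows]
--         ret.append(col.index('.') if '.' in col else -1)
--     return ret
-- ===== Notes on version B (the rewrite author's own statement) =====
-- stated objective: idiomatic
-- what changed: Replaces the row-major scan that mutates a sentinel array ret[j]==-1 by a column-major pass: transpose into 5 columns (short rows padded) and take each column's first '.' index via list.index, -1 if absent.
import Mathlib
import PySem

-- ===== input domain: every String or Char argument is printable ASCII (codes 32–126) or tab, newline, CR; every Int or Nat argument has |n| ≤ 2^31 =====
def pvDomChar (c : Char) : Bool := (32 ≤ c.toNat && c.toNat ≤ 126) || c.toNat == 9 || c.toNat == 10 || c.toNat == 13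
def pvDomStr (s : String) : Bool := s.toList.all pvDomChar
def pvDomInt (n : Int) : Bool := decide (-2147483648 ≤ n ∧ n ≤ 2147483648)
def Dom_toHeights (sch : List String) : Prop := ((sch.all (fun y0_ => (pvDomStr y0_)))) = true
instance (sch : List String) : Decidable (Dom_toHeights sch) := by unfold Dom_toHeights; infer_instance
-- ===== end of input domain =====

-- B replaces A's row-major scan with a sentinel array by a column-major first-'.' search (idiomatic rewrite, same cost).

-- ===== PORT A =====
def toHeights (sch : List String) : List Int :=
  let ret : List Int := [-1, -1, -1, -1, -1]
  let sch2 := if PySem.List.pyGet? sch 0 = some "....." then sch.reverse else sch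
  (PySem.List.pyRange 1 (sch2.length : Int) 1).foldl
    (fun ret i =>
      (PySem.List.enumerate (PySem.List.pyGetD sch2 i "").toList 0).foldl
        (fun ret jc =>
          if jc.2 = '.' ∧ PySem.List.pyGetD ret jc.1 (-2) = -1
          then PySem.List.pySetD ret jc.1 (i - 1) else ret)
        ret)
    ret

-- ===== PORT B =====
def toHeights_alt (sch : List String) : List Int :=
  let sch2 := if PySem.List.pyGet? sch 0 = some "....."
              then (PySem.List.slice? sch none none (-1)).getD [] else sch
  let rows := PySem.List.slice sch2 (some 1) none
  (PySem.List.pyRange 0 5 1).foldl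
    (fun ret j =>
      let col := rows.map (fun r =>
        if j < (PySem.Str.len r : Int) then PySem.List.pyGetD r.toList j '#' else '#')
      ret ++ [match PySem.List.index? col '.' with
              | some k => (k : Int)
              | none => -1])
    []

-- ===== PRECONDITION & SPEC =====
-- Pre_ excludes exactly the inputs on which Python A raises: the empty list (sch[0] is an
-- IndexError) and inputs where some SCANNED row (all rows after the possible flip, except the
-- first) has a '.' at column ≥ 5 (ret[j] is an IndexError there).
def Pre_toHeights (sch : List String) : Prop :=
  sch ≠ [] ∧ ∀ s ∈ (if sch.head? = some "....." then sch.reverse else sch).tail,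
    ((s.toList.drop 5).all (· ≠ '.')) = true
instance (sch : List String) : Decidable (Pre_toHeights sch) := by unfold Pre_toHeights; infer_instance
def pvWitness_toHeights : List String := ["#####", ".####", "..###"]

def Spec_toHeights (sch : List String) (out : List Int) : Prop := out = toHeights_alt sch
instance (sch : List String) (out : List Int) : Decidable (Spec_toHeights sch out) := by unfold Spec_toHeights; infer_instance

-- ===== CLAIM (what is proved, stated in full; the proofs are below) =====
def Claim_equal_toHeights : Prop := ∀ (sch : List String), Dom_toHeights sch → Pre_toHeights sch → Spec_toHeights sch (toHeights sch)

-- ===== LEMMAS AND PROOFS =====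

-- proof-side helpers: aStep/rowUpd/foldRows restate A's loops structurally
-- the character of row r in column j (missing characters read as '#')
def colAt (j : Nat) (r : String) : Char := r.toList.getD j '#'

-- index of the first row whose column-j character is '.', as the Int both programs produce
def fdInt (rows : List String) (j : Nat) : Int :=
  match rows.findIdx? (fun r => colAt j r == '.') with
  | some m => (m : Int)
  | none => -1

def aStep (i : Int) (ret : List Int) (jc : Int × Char) : List Int :=
  if jc.2 = '.' ∧ PySem.List.pyGetD ret jc.1 (-2) = -1
  then PySem.List.pySetD ret jc.1 (i - 1) else ret

def rowUpd (i : Int) (r : String) (ret : List Int) : List Int :=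
  (PySem.List.enumerate r.toList 0).foldl (aStep i) ret

def foldRows : List String → Int → List Int → List Int
  | [], _, ret => ret
  | r :: rs, i, ret => foldRows rs (i + 1) (rowUpd i r ret)

lemma len_aFold (i : Int) (cs : List Char) (k : Int) (ret : List Int) :
    ((PySem.List.enumerate cs k).foldl (aStep i) ret).length = ret.length := by
  induction cs generalizing k ret with
  | nil => simp [PySem.List.enumerate_nil]
  | cons c cs ih =>
    rw [PySem.List.enumerate_cons, List.foldl_cons, ih]
    unfold aStep
    split
    · simp [PySem.List.length_pySetD]
    · rfl

lemma getD_aFold (i : Int) (cs : List Char) (kn : Nat) (ret : List Int) (j : Nat) :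
    ((PySem.List.enumerate cs (kn : Int)).foldl (aStep i) ret).getD j (-2) =
      if kn ≤ j ∧ cs.getD (j - kn) '#' = '.' ∧ ret.getD j (-2) = -1
      then i - 1 else ret.getD j (-2) := by
  induction cs generalizing kn ret with
  | nil =>
    rw [PySem.List.enumerate_nil, List.foldl_nil]
    have h : ([] : List Char).getD (j - kn) '#' = '#' := rfl
    rw [if_neg (by rw [h]; rintro ⟨-, h2, -⟩; exact absurd h2 (by decide))]
  | cons c cs ih =>
    rw [PySem.List.enumerate_cons, List.foldl_cons]
    have hcast : (kn : Int) + 1 = ((kn + 1 : Nat) : Int) := by push_cast; ring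
    rw [hcast, ih]
    have hstep : aStep i ret ((kn : Int), c) =
        if c = '.' ∧ ret.getD kn (-2) = -1 then ret.set kn (i - 1) else ret := by
      simp [aStep]
    rw [hstep]
    by_cases hc : c = '.' ∧ ret.getD kn (-2) = -1
    · have hkn : kn < ret.length := by
        by_contra h
        have := List.getD_eq_default ret (-2) (n := kn) (by omega)
        omega
      rw [if_pos hc]
      by_cases hj : j = kn
      · subst hj
        have hset : (ret.set j (i - 1)).getD j (-2) = i - 1 := by
          rw [List.getD_eq_getElem?_getD, List.getElem?_set_self hkn]
          simp
        rw [if_neg (fun h => absurd h.1 (by omega)), hset,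
            if_pos ⟨Nat.le_refl j, by rw [Nat.sub_self, List.getD_cons_zero]; exact hc.1, hc.2⟩]
      · have hset : (ret.set kn (i - 1)).getD j (-2) = ret.getD j (-2) := by
          rw [List.getD_eq_getElem?_getD, List.getElem?_set_ne (by omega),
              ← List.getD_eq_getElem?_getD]
        rw [hset]
        by_cases hle : kn ≤ j
        · have h2 : (c :: cs).getD (j - kn) '#' = cs.getD (j - (kn + 1)) '#' := by
            have h3 : j - kn = (j - (kn + 1)) + 1 := by omega
            rw [h3]; rfl
          rw [h2]
          by_cases hrest : cs.getD (j - (kn + 1)) '#' = '.' ∧ ret.getD j (-2) = -1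
          · rw [if_pos ⟨by omega, hrest.1, hrest.2⟩, if_pos ⟨by omega, hrest.1, hrest.2⟩]
          · rw [if_neg (fun h => hrest ⟨h.2.1, h.2.2⟩), if_neg (fun h => hrest ⟨h.2.1, h.2.2⟩)]
        · rw [if_neg (fun h => absurd h.1 (by omega)), if_neg (fun h => hle h.1)]
    · rw [if_neg hc]
      by_cases hj : j = kn
      · subst hj
        have hcc : (c :: cs).getD (j - j) '#' = c := by simp
        rw [if_neg (fun h => absurd h.1 (by omega))]
        rw [if_neg (fun h => hc ⟨by have h21 := h.2.1; rwa [Nat.sub_self, List.getD_cons_zero] at h21, h.2.2⟩)]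
      · by_cases hle : kn ≤ j
        · have h2 : (c :: cs).getD (j - kn) '#' = cs.getD (j - (kn + 1)) '#' := by
            have h3 : j - kn = (j - (kn + 1)) + 1 := by omega
            rw [h3]; rfl
          rw [h2]
          by_cases hrest : cs.getD (j - (kn + 1)) '#' = '.' ∧ ret.getD j (-2) = -1
          · rw [if_pos ⟨by omega, hrest.1, hrest.2⟩, if_pos ⟨by omega, hrest.1, hrest.2⟩]
          · rw [if_neg (fun h => hrest ⟨h.2.1, h.2.2⟩), if_neg (fun h => hrest ⟨h.2.1, h.2.2⟩)]
        · rw [if_neg (fun h => absurd h.1 (by omega)), if_neg (fun h => hle h.1)]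

lemma len_rowUpd (i : Int) (r : String) (ret : List Int) :
    (rowUpd i r ret).length = ret.length := len_aFold i r.toList 0 ret

lemma getD_rowUpd (i : Int) (r : String) (ret : List Int) (j : Nat) :
    (rowUpd i r ret).getD j (-2) =
      if colAt j r = '.' ∧ ret.getD j (-2) = -1 then i - 1 else ret.getD j (-2) := by
  have h := getD_aFold i r.toList 0 ret j
  unfold rowUpd
  rw [show ((0 : Nat) : Int) = (0 : Int) from rfl] at h
  rw [h]
  unfold colAt
  by_cases hc : r.toList.getD j '#' = '.' ∧ ret.getD j (-2) = -1
  · rw [if_pos ⟨Nat.zero_le j, by simpa using hc.1, hc.2⟩, if_pos hc]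
  · rw [if_neg (fun h => hc ⟨by simpa using h.2.1, h.2.2⟩), if_neg hc]

lemma len_foldRows (rows : List String) (i : Int) (ret : List Int) :
    (foldRows rows i ret).length = ret.length := by
  induction rows generalizing i ret with
  | nil => rfl
  | cons r rs ih => rw [foldRows, ih, len_rowUpd]

lemma getD_foldRows (rows : List String) (i0 : Int) (ret : List Int) (j : Nat)
    (h1 : 1 ≤ i0) :
    (foldRows rows i0 ret).getD j (-2) =
      match rows.findIdx? (fun r => colAt j r == '.') with
      | some m => if ret.getD j (-2) = -1 then i0 + m - 1 else ret.getD j (-2)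
      | none => ret.getD j (-2) := by
  induction rows generalizing i0 ret with
  | nil => rfl
  | cons r rs ih =>
    rw [foldRows, ih _ _ (by omega), List.findIdx?_cons]
    by_cases hdot : colAt j r = '.'
    · rw [if_pos (by simpa using hdot)]
      by_cases hm1 : ret.getD j (-2) = -1
      · have hval : (rowUpd i0 r ret).getD j (-2) = i0 - 1 := by
          rw [getD_rowUpd, if_pos ⟨hdot, hm1⟩]
        have hne : ¬ ((rowUpd i0 r ret).getD j (-2) = -1) := by rw [hval]; omega
        cases hfd : rs.findIdx? (fun r => colAt j r == '.') with
        | none => dsimp only; rw [hval, if_pos hm1]; omega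
        | some m => dsimp only; rw [if_neg hne, hval, if_pos hm1]; omega
      · have hval : (rowUpd i0 r ret).getD j (-2) = ret.getD j (-2) := by
          rw [getD_rowUpd, if_neg (fun h => hm1 h.2)]
        cases hfd : rs.findIdx? (fun r => colAt j r == '.') with
        | none => dsimp only; rw [hval, if_neg hm1]
        | some m => dsimp only; rw [if_neg (hval ▸ hm1), hval, if_neg hm1]
    · rw [if_neg (by simpa using hdot)]
      have hval : (rowUpd i0 r ret).getD j (-2) = ret.getD j (-2) := by
        rw [getD_rowUpd, if_neg (fun h => hdot h.1)]
      cases hfd : rs.findIdx? (fun r => colAt j r == '.') with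
      | none => dsimp only [Option.map_none]; rw [hval]
      | some m =>
        dsimp only [Option.map_some]
        by_cases hm1 : ret.getD j (-2) = -1
        · rw [if_pos (hval ▸ hm1), if_pos hm1]; push_cast; ring
        · rw [if_neg (hval ▸ hm1), hval, if_neg hm1]

lemma bridge (sch2 : List String) :
    ∀ (n a : Nat) (ret : List Int), sch2.length ≤ a + n →
    (PySem.List.pyRange (a : Int) (sch2.length : Int) 1).foldl
      (fun ret i => rowUpd i (PySem.List.pyGetD sch2 i "") ret) ret
      = foldRows (sch2.drop a) (a : Int) ret := by
  intro n
  induction n with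
  | zero =>
    intro a ret h
    rw [List.drop_eq_nil_of_le (by omega), PySem.List.pyRange_one_eq_nil (by exact_mod_cast (by omega : sch2.length ≤ a)), List.foldl_nil]
    rfl
  | succ n ih =>
    intro a ret h
    by_cases hlt : a < sch2.length
    · rw [PySem.List.pyRange_one_cons (by exact_mod_cast hlt), List.foldl_cons]
      have e1 : PySem.List.pyGetD sch2 (a : Int) "" = sch2[a] := by
        rw [PySem.List.pyGetD_natCast, List.getD_eq_getElem _ _ hlt]
      have e2 : sch2.drop a = sch2[a] :: sch2.drop (a + 1) := List.drop_eq_getElem_cons hlt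
      rw [e2, foldRows, e1]
      have hcast : (a : Int) + 1 = ((a + 1 : Nat) : Int) := by push_cast; ring
      rw [hcast, ih (a + 1) _ (by omega)]
    · rw [List.drop_eq_nil_of_le (by omega), PySem.List.pyRange_one_eq_nil (by exact_mod_cast (by omega : sch2.length ≤ a)), List.foldl_nil]
      rfl

lemma Bcol (rows : List String) (jn : Nat) :
    (rows.map (fun r =>
      if (jn : Int) < (PySem.Str.len r : Int) then PySem.List.pyGetD r.toList (jn : Int) '#' else '#'))
    = rows.map (colAt jn) := by
  apply List.map_congr_left
  intro r _
  rw [PySem.List.pyGetD_natCast]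
  by_cases h : jn < r.toList.length
  · rw [if_pos (by simpa [PySem.Str.len_eq] using h)]
    rfl
  · rw [if_neg (by simpa [PySem.Str.len_eq] using h)]
    unfold colAt
    rw [List.getD_eq_default _ _ (by omega)]

lemma Bentry (rows : List String) (jn : Nat) :
    (match PySem.List.index? (rows.map (colAt jn)) '.' with
     | some k => (k : Int)
     | none => -1) = fdInt rows jn := by
  unfold fdInt
  rw [PySem.List.index?_eq_idxOf?, List.idxOf?, List.findIdx?_map]
  rfl

def natsToInts : List Nat → List Int
  | [] => []
  | n :: ns => (n : Int) :: natsToInts ns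

lemma Bfold (rows : List String) (js : List Nat) (acc : List Int) :
    (natsToInts js).foldl
      (fun ret j =>
        let col := rows.map (fun r =>
          if j < (PySem.Str.len r : Int) then PySem.List.pyGetD r.toList j '#' else '#')
        ret ++ [match PySem.List.index? col '.' with
                | some k => (k : Int)
                | none => -1])
      acc = acc ++ js.map (fdInt rows) := by
  induction js generalizing acc with
  | nil => simp [natsToInts]
  | cons n ns ih =>
    rw [natsToInts, List.foldl_cons, List.map_cons]
    show ((natsToInts ns).foldl _ (acc ++ [_])) = _
    rw [ih]
    rw [show (rows.map (fun r =>
          if (n : Int) < (PySem.Str.len r : Int) then PySem.List.pyGetD r.toList (n : Int) '#' else '#'))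
        = rows.map (colAt n) from Bcol rows n]
    rw [show (match PySem.List.index? (rows.map (colAt n)) '.' with
              | some k => (k : Int)
              | none => -1) = fdInt rows n from Bentry rows n]
    simp

lemma B_eq (sch : List String) :
    toHeights_alt sch =
      (([0, 1, 2, 3, 4] : List Nat).map
        (fdInt (if PySem.List.pyGet? sch 0 = some "....." then sch.reverse else sch).tail)) := by
  unfold toHeights_alt
  have hs2 : (if PySem.List.pyGet? sch 0 = some "....."
              then (PySem.List.slice? sch none none (-1)).getD [] else sch)
           = (if PySem.List.pyGet? sch 0 = some "....." then sch.reverse else sch) := by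
    rw [PySem.List.slice?_none_none_neg_one]; rfl
  rw [hs2]
  set s2 := if PySem.List.pyGet? sch 0 = some "....." then sch.reverse else sch with hdef
  show (PySem.List.pyRange 0 5 1).foldl
      (fun ret j =>
        let col := (PySem.List.slice s2 (some 1) none).map (fun r =>
          if j < (PySem.Str.len r : Int) then PySem.List.pyGetD r.toList j '#' else '#')
        ret ++ [match PySem.List.index? col '.' with
                | some k => (k : Int)
                | none => -1])
      [] = _
  rw [PySem.List.slice_from_one]
  rw [show PySem.List.pyRange 0 5 1 = natsToInts [0, 1, 2, 3, 4] by decide]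
  rw [Bfold s2.tail [0, 1, 2, 3, 4] []]
  rfl

lemma A_eq (sch : List String) :
    toHeights sch =
      foldRows (if PySem.List.pyGet? sch 0 = some "....." then sch.reverse else sch).tail
        (1 : Int) [-1, -1, -1, -1, -1] := by
  have h0 : toHeights sch =
      (PySem.List.pyRange 1 (((if PySem.List.pyGet? sch 0 = some "....." then sch.reverse else sch).length : Nat) : Int) 1).foldl
        (fun ret i => rowUpd i
          (PySem.List.pyGetD (if PySem.List.pyGet? sch 0 = some "....." then sch.reverse else sch) i "") ret)
        [-1, -1, -1, -1, -1] := rfl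
  set s2 := if PySem.List.pyGet? sch 0 = some "....." then sch.reverse else sch with hdef
  have hb := bridge s2 s2.length 1 ([-1, -1, -1, -1, -1]) (by omega)
  push_cast at hb
  rw [h0, hb, List.drop_one]

theorem toHeights_agree (sch : List String) : toHeights sch = toHeights_alt sch := by
  rw [A_eq, B_eq]
  set t := (if PySem.List.pyGet? sch 0 = some "....." then sch.reverse else sch).tail with hdef
  apply List.ext_getElem
  · rw [len_foldRows]; rfl
  · intro j hj hj2
    have hj5 : j < 5 := by simpa [len_foldRows] using hj
    rw [← List.getD_eq_getElem _ (-2) hj]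
    rw [getD_foldRows t _ _ j (by omega)]
    have hinit : ([-1, -1, -1, -1, -1] : List Int).getD j (-2) = -1 := by
      interval_cases j <;> rfl
    rw [hinit]
    unfold fdInt
    cases hfd : t.findIdx? (fun r => colAt j r == '.') with
    | none => interval_cases j <;> simp [hfd]
    | some m =>
      dsimp only
      rw [if_pos rfl]
      interval_cases j <;> simp [hfd]

-- ===== VERDICT (by name: the statement is the Claim_ definition above) =====
theorem toHeights_spec : Claim_equal_toHeights := by
  intro sch _ _
  exact toHeights_agree sch
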